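-- pv_equiv track=rewrite | github.com/pypi-data/pypi-mirror-233 | packages/mesh-common/mesh_common-0.2.7.tar.gz/mesh_common-0.2.7/mesh_common/encoding.py | negotiate_encoding
-- ===== SOURCE A (Python) =====
-- from typing import (
--     NamedTuple,
-- )
--
-- class ContentEncodingNegotiation(NamedTuple):
--     """
--     result of the content encoding negotiation
--     encoders / decoders are the sequence of encodings / decodings required to apply to the content to match the
--     accept_encoding e.g. if content_encoding=gzip,deflate,gzip  accept_encoding=gzip
--     would result in decoders['gzip', 'deflate'] ( decode gzip and deflate but leave the first gzip )
--     """
--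
--     accept_encoding: str
--     original_encoding: str
--     negotiated_encoding: str
--
--     decoders: list[str]
--     encoders: list[str]
--
--     @property
--     def changed(self) -> bool:
--         return self.original_encoding != self.negotiated_encoding
--
--     @property
--     def unchanged(self) -> bool:
--         return self.original_encoding == self.negotiated_encoding
--
-- def negotiate_encoding(
--     content_encoding: str | None, accept_encoding: str | None, auto_gzip=False
-- ) -> ContentEncodingNegotiation:
--     """
--     compare the current content encoding with the accepts header and negotiate the content encoding
--     and the sequence of decode / encode actions to apply
--     https://www.rfc-editor.org/rfc/rfc9110.html#name-accept-encoding
--     https://developer.mozilla.org/en-US/docs/Web/HTTP/Headers/Accept-Encoding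
--     """
--
--     content_encoding = (content_encoding or "").strip().lower()
--     accept_encoding = (accept_encoding or "").strip().lower()
--
--     content_encodings = [
--         enc.strip().split(";")[0] for enc in (content_encoding or "").strip().lower().split(",") if enc.strip()
--     ]
--     content_encoding = ",".join(content_encodings).strip()
--     accept_encodings = {enc.strip().strip(";").split(";")[0] for enc in accept_encoding.split(",") if enc.strip()}
--     accept_encodings = {key for key in accept_encodings if key and key != "*"}
--     encodings = set(content_encodings)
--     unaccepted_encodings = encodings - accept_encodings
--
--     decoders: list[str] = []
--     encoders: list[str] = []
--
--     while unaccepted_encodings: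
--         decoders.append(content_encodings.pop(-1))
--         unaccepted_encodings = set(content_encodings) - accept_encodings
--
--     encodings = set(content_encodings)
--
--     if not encodings and auto_gzip and "gzip" in accept_encodings:
--         encoders.append("gzip")
--         content_encodings.append("gzip")
--
--     return ContentEncodingNegotiation(
--         original_encoding=content_encoding,
--         accept_encoding=accept_encoding,
--         negotiated_encoding=",".join(content_encodings),
--         decoders=decoders,
--         encoders=encoders,
--     )
-- ===== SOURCE B (Python) =====
-- from typing import (
--     NamedTuple,
-- )
--
--
-- class ContentEncodingNegotiation(NamedTuple):
--     accept_encoding: str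
--     original_encoding: str
--     negotiated_encoding: str
--
--     decoders: list[str]
--     encoders: list[str]
--
--     @property
--     def changed(self) -> bool:
--         return self.original_encoding != self.negotiated_encoding
--
--     @property
--     def unchanged(self) -> bool:
--         return self.original_encoding == self.negotiated_encoding
--
--
-- def _csv_tokens(header: str) -> "list[str]":
--     return [tok.strip() for tok in header.split(",") if tok.strip()]
--
--
-- def negotiate_encoding(content_encoding, accept_encoding, auto_gzip=False):
--     content_encoding = (content_encoding or "").strip().lower()
--     accept_encoding = (accept_encoding or "").strip().lower()
--     content_encodings = [t.split(";")[0] for t in _csv_tokens(content_encoding)]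
--     accepted = {t.strip(";").split(";")[0] for t in _csv_tokens(accept_encoding)} - {"", "*"}
--
--     # instead of the repeated pop-and-rescan loop: one scan for the first unaccepted
--     # encoding; everything from there on has to be decoded, back to front
--     cut = next(
--         (j for j, enc in enumerate(content_encodings) if enc not in accepted),
--         len(content_encodings),
--     )
--     decoders = content_encodings[cut:][::-1]
--     negotiated = content_encodings[:cut]
--
--     encoders: "list[str]" = []
--     if not negotiated and auto_gzip and "gzip" in accepted:
--         encoders.append("gzip")
--         negotiated.append("gzip")
--
--     return ContentEncodingNegotiation(
--         accept_encoding=accept_encoding,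
--         original_encoding=",".join(content_encodings).strip(),
--         negotiated_encoding=",".join(negotiated),
--         decoders=decoders,
--         encoders=encoders,
--     )
-- ===== Notes on version B (the rewrite author's own statement) =====
-- stated objective: simpler
-- what changed: The repeated while-pop-and-rescan loop (rebuilding the set of remaining encodings after every pop) is replaced by a single forward scan locating the first unaccepted encoding, from which decoders and the kept prefix are one slice each; header parsing is factored into a shared _csv_tokens helper and the accept-set filter becomes a set difference.
import Mathlib
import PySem

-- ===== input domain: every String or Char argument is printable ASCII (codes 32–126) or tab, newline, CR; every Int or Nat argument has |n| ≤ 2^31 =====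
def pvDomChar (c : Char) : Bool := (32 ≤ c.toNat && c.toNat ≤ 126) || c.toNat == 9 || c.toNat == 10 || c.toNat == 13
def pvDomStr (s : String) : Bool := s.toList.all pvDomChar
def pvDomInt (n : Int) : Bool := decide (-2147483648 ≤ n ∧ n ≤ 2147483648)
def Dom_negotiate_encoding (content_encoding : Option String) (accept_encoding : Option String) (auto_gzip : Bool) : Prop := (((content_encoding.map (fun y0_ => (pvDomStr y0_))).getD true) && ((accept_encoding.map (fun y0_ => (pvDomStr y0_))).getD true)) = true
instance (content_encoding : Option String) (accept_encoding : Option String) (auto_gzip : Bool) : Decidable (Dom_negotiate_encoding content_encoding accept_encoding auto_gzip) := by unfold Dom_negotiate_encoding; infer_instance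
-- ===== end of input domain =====

-- B replaces A's repeated pop-and-rescan while loop by a single scan for the first unaccepted
-- encoding followed by one take/drop split (objective: simpler). Return-value equivalence only
-- (A pops from a local list it built itself, so no caller-visible mutation).

-- ===== PORT A =====
-- the while loop: while set(content_encodings) - accept_encodings: decoders.append(content_encodings.pop(-1))
-- (pop(-1) on a list the loop guard guarantees nonempty = getLastD/dropLast)
def pvPopLoop (ce : List String) (dec : List String) (acc : PySem.Set String) : List String × List String :=
  if (PySem.Set.diff (PySem.Set.ofList ce) acc).isEmpty then (ce, dec)
  else pvPopLoop ce.dropLast (dec ++ [ce.getLastD ""]) acc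
termination_by ce.length
decreasing_by
  have hne : ce ≠ [] := by
    rintro rfl
    simp [PySem.Set.diff, PySem.Set.ofList] at *
  have := List.length_pos_of_ne_nil hne
  simp [List.length_dropLast]; omega

def negotiate_encoding (content_encoding : Option String) (accept_encoding : Option String) (auto_gzip : Bool) : String × String × String × List String × List String :=
  -- content_encoding = (content_encoding or "").strip().lower(); same for accept_encoding
  -- ('s or ""' on a str is s itself: "" stays "")
  let ce := PySem.Str.lower (PySem.Str.strip (content_encoding.getD ""))
  let ae := PySem.Str.lower (PySem.Str.strip (accept_encoding.getD ""))
  -- [enc.strip().split(";")[0] for enc in (content_encoding or "").strip().lower().split(",") if enc.strip()]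
  -- (split(",")/split(";") have a nonempty separator, so split? is some; split never returns [], so [0] = headD "")
  let contentEncodings :=
    (((PySem.Str.split? (PySem.Str.lower (PySem.Str.strip ce)) ",").getD []).filter
        (fun enc => !(PySem.Str.strip enc == ""))).map
      (fun enc => ((PySem.Str.split? (PySem.Str.strip enc) ";").getD []).headD "")
  -- content_encoding = ",".join(content_encodings).strip()
  let ce2 := PySem.Str.strip (PySem.Str.join "," contentEncodings)
  -- accept_encodings = {enc.strip().strip(";").split(";")[0] for enc in accept_encoding.split(",") if enc.strip()}
  let acceptSet0 : PySem.Set String :=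
    PySem.Set.ofList
      ((((PySem.Str.split? ae ",").getD []).filter (fun enc => !(PySem.Str.strip enc == ""))).map
        (fun enc => ((PySem.Str.split? (PySem.Str.stripChars (PySem.Str.strip enc) ";") ";").getD []).headD ""))
  -- accept_encodings = {key for key in accept_encodings if key and key != "*"}  (membership-only use below)
  let acceptSet : PySem.Set String := acceptSet0.filter (fun k => !(k == "") && !(k == "*"))
  -- decoders = []; while unaccepted_encodings: decoders.append(content_encodings.pop(-1)); …
  let res := pvPopLoop contentEncodings [] acceptSet
  -- if not encodings and auto_gzip and "gzip" in accept_encodings: append "gzip" to encoders and content_encodings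
  let pair :=
    if (PySem.Set.ofList res.1).isEmpty && auto_gzip && PySem.Set.contains acceptSet "gzip" then
      (res.1 ++ ["gzip"], ["gzip"])
    else (res.1, ([] : List String))
  (ae, ce2, PySem.Str.join "," pair.1, res.2, pair.2)

-- ===== PORT B =====
-- _csv_tokens(header): [tok.strip() for tok in header.split(",") if tok.strip()]
def pvCsvTokens (header : String) : List String :=
  (((PySem.Str.split? header ",").getD []).filter (fun tok => !(PySem.Str.strip tok == ""))).map
    (fun tok => PySem.Str.strip tok)

-- cut = next((j for j, enc in enumerate(content_encodings) if enc not in accept_encodings), len(content_encodings))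
def pvCut (l : List String) (accepted : PySem.Set String) : Nat :=
  (l.findIdx? (fun enc => !(PySem.Set.contains accepted enc))).getD l.length

def negotiate_encoding_alt (content_encoding : Option String) (accept_encoding : Option String) (auto_gzip : Bool) : String × String × String × List String × List String :=
  let ce := PySem.Str.lower (PySem.Str.strip (content_encoding.getD ""))
  let ae := PySem.Str.lower (PySem.Str.strip (accept_encoding.getD ""))
  -- content_encodings = [t.split(";")[0] for t in _csv_tokens(content_encoding)]
  let contentEncodings :=
    (pvCsvTokens ce).map (fun t => ((PySem.Str.split? t ";").getD []).headD "")
  -- accepted = {t.strip(";").split(";")[0] for t in _csv_tokens(accept_encoding)} - {"", "*"}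
  let accepted : PySem.Set String :=
    PySem.Set.diff
      (PySem.Set.ofList ((pvCsvTokens ae).map
        (fun t => ((PySem.Str.split? (PySem.Str.stripChars t ";") ";").getD []).headD "")))
      (PySem.Set.ofList ["", "*"])
  let cut := pvCut contentEncodings accepted
  -- decoders = content_encodings[cut:][::-1]; negotiated = content_encodings[:cut]  (0 ≤ cut ≤ len: drop/take)
  let decoders := (contentEncodings.drop cut).reverse
  let negotiated := contentEncodings.take cut
  -- if not negotiated and auto_gzip and "gzip" in accepted: encoders/negotiated gain "gzip"
  let pair :=
    if negotiated.isEmpty && auto_gzip && PySem.Set.contains accepted "gzip" then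
      (negotiated ++ ["gzip"], ["gzip"])
    else (negotiated, ([] : List String))
  (ae, PySem.Str.strip (PySem.Str.join "," contentEncodings), PySem.Str.join "," pair.1, decoders, pair.2)

-- ===== PRECONDITION & SPEC =====
def Spec_negotiate_encoding (content_encoding : Option String) (accept_encoding : Option String) (auto_gzip : Bool) (out : String × String × String × List String × List String) : Prop := out = negotiate_encoding_alt content_encoding accept_encoding auto_gzip
instance (content_encoding : Option String) (accept_encoding : Option String) (auto_gzip : Bool) (out : String × String × String × List String × List String) : Decidable (Spec_negotiate_encoding content_encoding accept_encoding auto_gzip out) := by unfold Spec_negotiate_encoding; infer_instance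

-- ===== CLAIM (what is proved, stated in full; the proofs are below) =====
def Claim_equal_negotiate_encoding : Prop := ∀ (content_encoding : Option String) (accept_encoding : Option String) (auto_gzip : Bool), Dom_negotiate_encoding content_encoding accept_encoding auto_gzip → Spec_negotiate_encoding content_encoding accept_encoding auto_gzip (negotiate_encoding content_encoding accept_encoding auto_gzip)

-- ===== LEMMAS AND PROOFS =====

theorem pvIsupperIff (c : Char) : PySem.Chars.isupper c = true ↔ 65 ≤ c.toNat ∧ c.toNat ≤ 90 := by
  have hA : 'A'.toNat = 65 := rfl
  have hZ : 'Z'.toNat = 90 := rfl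
  simp only [PySem.Chars.isupper, Bool.and_eq_true, decide_eq_true_eq, Char.le_def,
    UInt32.le_iff_toNat_le, Char.toNat_val, hA, hZ]

theorem pvCharOfNatToNat (n : Nat) (h : n < 55296) : (Char.ofNat n).toNat = n := by
  unfold Char.ofNat
  split
  · rfl
  · rename_i hc; exfalso; exact hc (Or.inl h)

theorem pvSpaceLower (c : Char) : PySem.Chars.isspace (PySem.Chars.lowerChar c) = PySem.Chars.isspace c := by
  unfold PySem.Chars.lowerChar
  split
  · rename_i h
    have hb := (pvIsupperIff c).mp h
    have ht : (Char.ofNat (c.toNat + 32)).toNat = c.toNat + 32 := pvCharOfNatToNat _ (by omega)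
    simp only [PySem.Chars.isspace, ht]
    rw [Bool.eq_iff_iff]
    simp only [Bool.or_eq_true, Bool.and_eq_true, decide_eq_true_eq]
    omega
  · rfl

theorem pvLowerLowerChar (c : Char) : PySem.Chars.lowerChar (PySem.Chars.lowerChar c) = PySem.Chars.lowerChar c := by
  unfold PySem.Chars.lowerChar
  split
  · rename_i h
    have hb := (pvIsupperIff c).mp h
    have ht : (Char.ofNat (c.toNat + 32)).toNat = c.toNat + 32 := pvCharOfNatToNat _ (by omega)
    rw [if_neg]
    intro hc
    have := (pvIsupperIff _).mp hc
    omega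
  · rfl

theorem pvLowerLower (m : List Char) : PySem.Chars.lower (PySem.Chars.lower m) = PySem.Chars.lower m := by
  unfold PySem.Chars.lower
  rw [List.map_map]
  exact List.map_congr_left (fun c _ => pvLowerLowerChar c)

theorem pvStripLower (m : List Char) :
    PySem.Chars.strip (PySem.Chars.lower m) = PySem.Chars.lower (PySem.Chars.strip m) := by
  unfold PySem.Chars.strip PySem.Chars.lstrip PySem.Chars.rstrip PySem.Chars.lower
  have hps : (PySem.Chars.isspace ∘ PySem.Chars.lowerChar) = PySem.Chars.isspace :=
    funext pvSpaceLower
  rw [List.dropWhile_map, hps, ← List.map_reverse, List.dropWhile_map, hps, List.map_reverse]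

theorem pvStripStrip (m : List Char) :
    PySem.Chars.strip (PySem.Chars.strip m) = PySem.Chars.strip m := by
  unfold PySem.Chars.strip PySem.Chars.rstrip PySem.Chars.lstrip
  generalize hy : List.dropWhile PySem.Chars.isspace m = y
  have hyy : List.dropWhile PySem.Chars.isspace y = y := by
    rw [← hy]; exact List.dropWhile_idempotent _ _
  have hrrev : ((List.dropWhile PySem.Chars.isspace y.reverse).reverse).reverse
      = List.dropWhile PySem.Chars.isspace y.reverse := by simp
  have h1 : List.dropWhile PySem.Chars.isspace
      (List.dropWhile PySem.Chars.isspace y.reverse).reverse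
      = (List.dropWhile PySem.Chars.isspace y.reverse).reverse := by
    rw [List.dropWhile_eq_self_iff]
    intro hl
    have hpre : (List.dropWhile PySem.Chars.isspace y.reverse).reverse <+: y := by
      rw [← List.reverse_suffix, hrrev]
      exact List.dropWhile_suffix _
    obtain ⟨t, ht⟩ := hpre
    have hylen : 0 < y.length := by
      rw [← ht]; simp only [List.length_append]; omega
    have hy0 := List.dropWhile_eq_self_iff.mp hyy hylen
    have h1 := List.getElem_of_eq ht.symm hylen
    rw [h1, List.getElem_append_left hl] at hy0
    exact hy0
  rw [h1, hrrev, List.dropWhile_idempotent]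

theorem pvNormIdem (s : String) :
    PySem.Str.lower (PySem.Str.strip (PySem.Str.lower (PySem.Str.strip s)))
      = PySem.Str.lower (PySem.Str.strip s) := by
  rw [← String.toList_inj]
  simp only [PySem.Str.toList_lower, PySem.Str.toList_strip]
  rw [pvStripLower, pvLowerLower, pvStripStrip]

theorem pvContainsMem (acc : PySem.Set String) (e : String) :
    PySem.Set.contains acc e = true ↔ e ∈ acc := by
  simp [PySem.Set.contains]

theorem pvDiffEmpty (m : List String) (acc : PySem.Set String) :
    (PySem.Set.diff (PySem.Set.ofList m) acc).isEmpty = true ↔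
      ∀ e ∈ m, PySem.Set.contains acc e = true := by
  simp [PySem.Set.diff, PySem.Set.contains, List.isEmpty_iff, List.filter_eq_nil_iff,
        PySem.Set.mem_ofList]

theorem pvCut_eq_length (m : List String) (acc : PySem.Set String)
    (h : ∀ e ∈ m, PySem.Set.contains acc e = true) : pvCut m acc = m.length := by
  unfold pvCut
  rw [List.findIdx?_eq_none_iff.mpr (fun e he => by simp [(pvContainsMem acc e).mp (h e he)])]
  rfl

theorem pvCut_append_none (l : List String) (x : String) (acc : PySem.Set String)
    (hl : ∀ e ∈ l, PySem.Set.contains acc e = true)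
    (hx : PySem.Set.contains acc x = false) : pvCut (l ++ [x]) acc = l.length := by
  have hx' : ¬ x ∈ acc := by
    intro h; rw [(pvContainsMem acc x).mpr h] at hx; simp at hx
  unfold pvCut
  rw [List.findIdx?_append,
      List.findIdx?_eq_none_iff.mpr (fun e he => by simp [(pvContainsMem acc e).mp (hl e he)])]
  simp [List.findIdx?_cons, hx']

theorem pvCut_append_some (l : List String) (x : String) (acc : PySem.Set String) (j : Nat)
    (hj : l.findIdx? (fun enc => !(PySem.Set.contains acc enc)) = some j) :
    pvCut (l ++ [x]) acc = j ∧ pvCut l acc = j := by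
  unfold pvCut
  rw [List.findIdx?_append, hj]
  simp

-- the while-pop loop equals a take/drop split at the first unaccepted index
theorem pvPopLoop_eq (acc : PySem.Set String) (l : List String) : ∀ dec : List String,
    pvPopLoop l dec acc = (l.take (pvCut l acc), dec ++ (l.drop (pvCut l acc)).reverse) := by
  induction l using List.reverseRecOn with
  | nil =>
    intro dec
    rw [pvPopLoop]
    simp [pvCut, PySem.Set.diff]
  | append_singleton l x ih =>
    intro dec
    rw [pvPopLoop]
    by_cases hall : ∀ e ∈ l ++ [x], PySem.Set.contains acc e = true
    · rw [if_pos ((pvDiffEmpty _ _).mpr hall)]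
      rw [pvCut_eq_length _ _ hall]
      simp
    · rw [if_neg (by rw [pvDiffEmpty]; exact hall)]
      rw [List.dropLast_concat, List.getLastD_concat, ih]
      rcases hj : l.findIdx? (fun enc => !(PySem.Set.contains acc enc)) with _ | j
      · -- all of l accepted; x must be the unaccepted one
        have hxl : ∀ e ∈ l, PySem.Set.contains acc e = true := by
          intro e he
          have := List.findIdx?_eq_none_iff.mp hj e he
          simpa using this
        have hx : PySem.Set.contains acc x = false := by
          by_contra hc
          exact hall (fun e he => by
            rcases List.mem_append.mp he with h | h
            · exact hxl e h
            · simp at h; subst h; simpa using hc)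
        rw [pvCut_append_none l x acc hxl hx, pvCut_eq_length l acc hxl]
        simp
      · -- first unaccepted index j lies inside l
        have hjlt : j < l.length := by
          have := List.findIdx?_eq_some_iff_findIdx_eq.mp hj
          omega
        obtain ⟨h1, h2⟩ := pvCut_append_some l x acc j hj
        rw [h1, h2]
        rw [List.take_append_of_le_length (le_of_lt hjlt),
            List.drop_append_of_le_length (le_of_lt hjlt)]
        simp

theorem pvPopLoop_nil (acc : PySem.Set String) (l : List String) :
    pvPopLoop l [] acc = (l.take (pvCut l acc), (l.drop (pvCut l acc)).reverse) := by
  rw [pvPopLoop_eq, List.nil_append]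

-- set(l) is empty iff l is
theorem pvOfList_isEmpty (l : List String) : (PySem.Set.ofList l).isEmpty = l.isEmpty := by
  cases l with
  | nil => rfl
  | cons a l =>
    have h : a ∈ PySem.Set.ofList (a :: l) := by simp [PySem.Set.mem_ofList]
    simp only [List.isEmpty_cons]
    cases he : (PySem.Set.ofList (a :: l) : List String) with
    | nil => rw [he] at h; simp at h
    | cons b m => simp

-- the second set comprehension of A is B's set difference with {"", "*"}
theorem pvFilterDiff (s : PySem.Set String) :
    s.filter (fun k => !(k == "") && !(k == "*")) =
      PySem.Set.diff s (PySem.Set.ofList ["", "*"]) := by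
  unfold PySem.Set.diff
  apply List.filter_congr
  intro x _
  have h2 : (PySem.Set.ofList ["", "*"] : List String) = ["", "*"] := rfl
  rw [h2]
  by_cases h0 : x = ""
  · subst h0; simp [PySem.Set.contains]
  · by_cases h1 : x = "*"
    · subst h1; simp [PySem.Set.contains]
    · simp [PySem.Set.contains, h0, h1]

-- ===== VERDICT (by name: the statement is the Claim_ definition above) =====
theorem negotiate_encoding_spec : Claim_equal_negotiate_encoding := by
  intro content_encoding accept_encoding auto_gzip _
  unfold Spec_negotiate_encoding negotiate_encoding negotiate_encoding_alt pvCsvTokens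
  simp only [List.map_map, Function.comp_def]
  rw [pvNormIdem, pvFilterDiff, pvPopLoop_nil, pvOfList_isEmpty]
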